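-- pv_equiv track=rewrite | github.com/Dadajon/100-days-of-code | competitive-programming/hackerrank/mathematics/06-leonardo's-prime-factors/leonardo's-prime-factors.py | primeCount
-- ===== SOURCE A (Python) =====
-- def primeCount(n):
--     prime_numbers = [2, 3, 5, 7, 11, 13, 17, 19, 23, 29, 31, 37, 41, 43, 47, 53, 59, 61, 67, 71, 73, 79, 83, 89, 97]
--     flag = 0
--     prime = 1
--
--     if (n < 2):
--         return flag
--     else:
--         for i in prime_numbers:
--             prime *= i
--             if (prime <= n):
--                 flag += 1
--
--     return flag
-- ===== SOURCE B (Python) =====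
-- _PRIMES = [2, 3, 5, 7, 11, 13, 17, 19, 23, 29, 31, 37, 41, 43, 47, 53, 59, 61, 67, 71, 73, 79, 83, 89, 97]
--
-- _PRODS = []
-- _acc = 1
-- for _p in _PRIMES:
--     _acc *= _p
--     _PRODS.append(_acc)
--
--
-- def primeCount(n):
--     # binary search: count of cumulative prime products <= n (bisect_right by hand)
--     lo, hi = 0, len(_PRODS)
--     while lo < hi:
--         mid = (lo + hi) // 2
--         if _PRODS[mid] <= n:
--             lo = mid + 1
--         else:
--             hi = mid
--     return lo
-- ===== Notes on version B (the rewrite author's own statement) =====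
-- stated objective: alternative
-- what changed: B precomputes the table of cumulative prime products once at module level and answers each query by binary search (bisect_right by hand) over that sorted table, instead of A's linear accumulate-and-count loop with its explicit small-input guard.
import Mathlib
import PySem

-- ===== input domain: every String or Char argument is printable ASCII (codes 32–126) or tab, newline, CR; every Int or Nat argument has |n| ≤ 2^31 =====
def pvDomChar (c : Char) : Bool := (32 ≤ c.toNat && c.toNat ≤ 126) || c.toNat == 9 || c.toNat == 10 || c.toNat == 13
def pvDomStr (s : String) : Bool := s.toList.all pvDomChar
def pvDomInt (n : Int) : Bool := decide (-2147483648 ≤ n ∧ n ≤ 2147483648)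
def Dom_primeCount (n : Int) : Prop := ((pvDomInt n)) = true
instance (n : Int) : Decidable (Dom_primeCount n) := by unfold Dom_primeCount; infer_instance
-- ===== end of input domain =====

-- B replaces A's linear accumulate-and-count loop by a precomputed table of cumulative
-- prime products queried with a hand-written binary search (bisect_right); alternative, not faster.


-- ===== PORT A =====
def primeCount (n : Int) : Int :=
  let prime_numbers : List Int := [2, 3, 5, 7, 11, 13, 17, 19, 23, 29, 31, 37, 41, 43, 47, 53, 59, 61, 67, 71, 73, 79, 83, 89, 97]
  let flag : Int := 0
  let prime : Int := 1
  if n < 2 then flag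
  else
    (prime_numbers.foldl
      (fun (st : Int × Int) i =>
        let prime := st.2 * i
        (if prime ≤ n then st.1 + 1 else st.1, prime))
      (flag, prime)).1

-- ===== PORT B =====
def altPrimes : List Int := [2, 3, 5, 7, 11, 13, 17, 19, 23, 29, 31, 37, 41, 43, 47, 53, 59, 61, 67, 71, 73, 79, 83, 89, 97]

-- module-level table build: cumulative products of the primes
def altProds : List Int :=
  (altPrimes.foldl (fun (st : Int × List Int) p =>
    let acc := st.1 * p
    (acc, st.2 ++ [acc])) (1, [])).2

-- the while-loop of B; the fuel argument only bounds the iteration count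
-- (hi - lo shrinks every round, so fuel = table length always suffices)
def altBisect (n : Int) : Nat → Nat → Nat → Nat
  | 0, lo, _ => lo
  | fuel + 1, lo, hi =>
    if lo < hi then
      let mid := (lo + hi) / 2
      if altProds.getD mid 0 ≤ n then altBisect n fuel (mid + 1) hi
      else altBisect n fuel lo mid
    else lo

def primeCount_alt (n : Int) : Int :=
  (altBisect n altProds.length 0 altProds.length : Int)

-- ===== PRECONDITION & SPEC =====
def Spec_primeCount (n : Int) (out : Int) : Prop := out = primeCount_alt n
instance (n : Int) (out : Int) : Decidable (Spec_primeCount n out) := by unfold Spec_primeCount; infer_instance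

-- ===== CLAIM (what is proved, stated in full; the proofs are below) =====
def Claim_equal_primeCount : Prop := ∀ (n : Int), Dom_primeCount n → Spec_primeCount n (primeCount n)

-- ===== LEMMAS AND PROOFS =====

-- the cumulative-product table as a literal
def prodsL : List Int := [2, 6, 30, 210, 2310, 30030, 510510, 9699690, 223092870, 6469693230, 200560490130, 7420738134810, 304250263527210, 13082761331670030, 614889782588491410, 32589158477190044730, 1922760350154212639070, 117288381359406970983270, 7858321551080267055879090, 557940830126698960967415390, 40729680599249024150621323470, 3217644767340672907899084554130, 267064515689275851355624017992790, 23768741896345550770650537601358310, 2305567963945518424753102147331756070]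

lemma altProds_eq : altProds = prodsL := by decide

lemma prodsL_sorted : List.Pairwise (fun x1 x2 : Int => x1 ≤ x2) prodsL := by decide

-- the running products seen by A's fold, starting from seed p
def prefixProds (p : Int) : List Int → List Int
  | [] => []
  | i :: t => (p * i) :: prefixProds (p * i) t

lemma prefixProds_primes : prefixProds 1 ([2, 3, 5, 7, 11, 13, 17, 19, 23, 29, 31, 37, 41, 43, 47, 53, 59, 61, 67, 71, 73, 79, 83, 89, 97] : List Int) = prodsL := by decide

-- A's fold counts the prefix products that are ≤ n
lemma foldA (n : Int) : ∀ (l : List Int) (f p : Int),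
    (l.foldl (fun (st : Int × Int) i =>
        let prime := st.2 * i
        (if prime ≤ n then st.1 + 1 else st.1, prime)) (f, p)).1
      = f + ((prefixProds p l).countP (fun x => decide (x ≤ n)) : Int) := by
  intro l
  induction l with
  | nil => intro f p; simp [prefixProds]
  | cons a t ih =>
    intro f p
    simp only [List.foldl, prefixProds, List.countP_cons]
    rw [ih]
    by_cases h : p * a ≤ n <;> simp [h] <;> ring_nf

-- a predicate holding exactly on the first c indices has count c
lemma countP_of_prefix (P : Int → Bool) : ∀ (l : List Int) (c : Nat), c ≤ l.length →
    (∀ j : Nat, j < l.length → (P (l.getD j 0) = true ↔ j < c)) →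
    l.countP P = c := by
  intro l
  induction l with
  | nil => intro c hc _; simp at hc; simp [hc]
  | cons a t ih =>
    intro c hc h
    have h0 := h 0 (by simp)
    cases c with
    | zero =>
      have ha : P a = false := by
        simp at h0; simpa using h0
      have ht : t.countP P = 0 := by
        apply ih 0 (by omega)
        intro j hj
        have := h (j + 1) (by simpa using Nat.succ_lt_succ hj)
        simpa using this
      rw [List.countP_cons, ht]
      simp [ha]
    | succ c' =>
      have ha : P a = true := by simpa using h0.mpr (Nat.succ_pos c')
      have ht : t.countP P = c' := by
        apply ih c' (by simpa using hc)
        intro j hj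
        have := h (j + 1) (by simpa using Nat.succ_lt_succ hj)
        simpa [Nat.succ_lt_succ_iff] using this
      rw [List.countP_cons, ht]
      simp [ha]

-- invariant of B's binary-search loop
lemma altBisect_eq (n : Int) (c : Nat)
    (hlow : ∀ i : Nat, i < c → altProds.getD i 0 ≤ n)
    (hhigh : ∀ i : Nat, c ≤ i → i < 25 → n < altProds.getD i 0) :
    ∀ (d lo hi : Nat), hi - lo ≤ d → hi ≤ 25 → lo ≤ c → c ≤ hi → altBisect n d lo hi = c := by
  intro d
  induction d with
  | zero =>
    intro lo hi h1 h2 h3 h4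
    simp only [altBisect]
    omega
  | succ d ih =>
    intro lo hi h1 h2 h3 h4
    simp only [altBisect]
    by_cases hl : lo < hi
    · rw [if_pos hl]
      by_cases hcmp : altProds.getD ((lo + hi) / 2) 0 ≤ n
      · rw [if_pos hcmp]
        have hmc : (lo + hi) / 2 < c := by
          by_contra hx
          push_neg at hx
          exact absurd hcmp (not_le.mpr (hhigh _ hx (by omega)))
        exact ih _ _ (by omega) h2 (by omega) h4
      · rw [if_neg hcmp]
        have hcm : c ≤ (lo + hi) / 2 := by
          by_contra hx
          push_neg at hx
          exact hcmp (hlow _ hx)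
        exact ih _ _ (by omega) (by omega) h3 hcm
    · rw [if_neg hl]; omega

-- ===== VERDICT (by name: the statement is the Claim_ definition above) =====
theorem primeCount_spec : Claim_equal_primeCount := by
  intro n _
  unfold Spec_primeCount
  -- the common value: bisect_right of n in the sorted product table
  set c := PySem.List.bisectRight prodsL n with hc
  obtain ⟨hclen, hlow, hhigh⟩ := PySem.List.bisectRight_spec prodsL n prodsL_sorted
  have hlen : prodsL.length = 25 := by decide
  have hlow' : ∀ i : Nat, i < c → altProds.getD i 0 ≤ n := by
    intro i hi
    have hil : i < prodsL.length := by omega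
    have := hlow i hil hi
    rw [altProds_eq, List.getD_eq_getElem _ _ hil]
    exact this
  have hhigh' : ∀ i : Nat, c ≤ i → i < 25 → n < altProds.getD i 0 := by
    intro i hci hi
    have hil : i < prodsL.length := by omega
    have := hhigh i hil hci
    rw [altProds_eq, List.getD_eq_getElem _ _ hil]
    exact this
  -- B computes c
  have hB : primeCount_alt n = (c : Int) := by
    unfold primeCount_alt
    rw [altBisect_eq n c hlow' hhigh' altProds.length 0 altProds.length
      (by omega) (by rw [altProds_eq, hlen]) (by omega)
      (by rw [altProds_eq, hlen]; omega)]
  -- A computes c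
  have hcount : prodsL.countP (fun x => decide (x ≤ n)) = c := by
    apply countP_of_prefix _ _ _ (by omega)
    intro j hj
    constructor
    · intro hP
      by_contra hx
      push_neg at hx
      have := hhigh' j hx (by omega)
      rw [altProds_eq] at this
      simp at hP
      exact absurd this (not_lt.mpr hP)
    · intro hjc
      have := hlow' j hjc
      rw [altProds_eq] at this
      simpa using this
  have hA : primeCount n = (c : Int) := by
    unfold primeCount
    by_cases h2 : n < 2
    · simp only [if_pos h2]
      have hc0 : c = 0 := by
        by_contra hx
        have := hlow' 0 (by omega)
        rw [altProds_eq] at this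
        simp [prodsL] at this
        omega
      omega
    · simp only [if_neg h2]
      rw [foldA, prefixProds_primes, hcount]
      omega
  rw [hA, hB]
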